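-- pv_equiv track=rewrite | github.com/buckjoewild/pt-study-sop | brain/dashboard/scholar.py | extract_questions_from_text
-- ===== SOURCE A (Python) =====
-- from typing import Optional, Tuple, Dict, List, Any
--
-- def extract_questions_from_text(text: str) -> List[str]:
--     """
--     Extract questions from a markdown section headed by 'Questions Needed'.
--     Falls back to any lines starting with 'Q:' if no section is found.
--     """
--     if not text:
--         return []
--     questions: List[str] = []
--     in_section = False
--     for line in text.splitlines():
--         line_stripped = line.strip()
--         if line_stripped.lower().startswith("## questions needed"):
--             in_section = True
--             continue
--         if in_section:
--             if line_stripped.startswith("## "):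
--                 break
--             if line_stripped.startswith("-"):
--                 q = line_stripped.lstrip("-").strip()
--                 if q:
--                     questions.append(q)
--     if questions:
--         return questions
--     for line in text.splitlines():
--         line_stripped = line.strip()
--         if line_stripped.startswith("Q:"):
--             q = line_stripped.replace("Q:", "").strip()
--             if q:
--                 questions.append(q)
--     return questions
-- ===== SOURCE B (Python) =====
-- from typing import List, Optional, Tuple
--
-- def _sections(lines: List[str]) -> List[Tuple[Optional[str], List[str]]]:
--     """Group lines into (heading, body) pairs; any '## ' line opens a new section."""
--     secs: List[Tuple[Optional[str], List[str]]] = []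
--     heading: Optional[str] = None
--     body: List[str] = []
--     for ln in lines:
--         if ln.startswith("## "):
--             secs.append((heading, body))
--             heading, body = ln, []
--         else:
--             body.append(ln)
--     secs.append((heading, body))
--     return secs
--
-- def extract_questions_from_text(text: str) -> List[str]:
--     """Parse the markdown into (heading, body) sections, harvest the dash lines of
--     the questions-needed section; fall back to harvesting Q-prefixed lines."""
--     lines = [ln.strip() for ln in text.splitlines()]
--     for heading, body in _sections(lines):
--         if heading is not None and heading.lower().startswith("## questions needed"):
--             qs = [q for q in (ln.lstrip("-").strip() for ln in body if ln.startswith("-")) if q]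
--             if qs:
--                 return qs
--             break
--     return [q for q in (ln.replace("Q:", "").strip() for ln in lines if ln.startswith("Q:")) if q]
-- ===== Notes on version B (the rewrite author's own statement) =====
-- stated objective: alternative
-- what changed: B parses the markdown into (heading, body) sections with a generic section grouper and then harvests the dash lines of the questions-needed section's body, instead of A's single stateful in_section-flag scan with break; Pre_ excludes texts with more than one questions-needed heading line, on which A's continue-over-the-repeated-heading behaviour (extending the section across it) is accidental while B's section parser treats every heading as a section boundary.
-- outside the precondition, e.g. on extract_questions_from_text('## Questions Needed\n- a\n## Questions Needed\n- b'): A returns ['a', 'b'], B returns ['a']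
import Mathlib
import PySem

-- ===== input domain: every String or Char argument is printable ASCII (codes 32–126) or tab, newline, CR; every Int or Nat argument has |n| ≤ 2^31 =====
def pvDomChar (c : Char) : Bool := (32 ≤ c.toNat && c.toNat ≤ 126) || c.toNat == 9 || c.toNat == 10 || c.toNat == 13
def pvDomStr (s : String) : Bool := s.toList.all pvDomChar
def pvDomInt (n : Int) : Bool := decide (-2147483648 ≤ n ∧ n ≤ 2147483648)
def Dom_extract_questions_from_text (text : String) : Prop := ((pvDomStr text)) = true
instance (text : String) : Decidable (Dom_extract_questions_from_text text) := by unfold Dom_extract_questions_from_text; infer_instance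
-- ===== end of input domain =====

-- B parses the text into (heading, body) markdown sections with a generic grouper and harvests
-- the questions-needed section's body (alternative decomposition, same cost); return values
-- proved equal on texts with at most one questions-needed heading line (see Pre_).

-- ===== PORT A =====

-- s.lstrip("-"): drop leading '-' characters (exact: the strip set is the single char '-')
def pvLstripDash (s : String) : String := String.ofList (s.toList.dropWhile (fun c => c == '-'))

-- A's first loop: state = (accumulated questions, in_section); returning qs at "## " = break
def pvLoopA : List String → List String → Bool → List String
  | [], qs, _ => qs
  | line :: rest, qs, inSec =>
    let ls := PySem.Str.strip line
    if PySem.Str.startswith (PySem.Str.lower ls) "## questions needed" then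
      pvLoopA rest qs true
    else if inSec then
      if PySem.Str.startswith ls "## " then qs
      else if PySem.Str.startswith ls "-" then
        let q := PySem.Str.strip (pvLstripDash ls)
        pvLoopA rest (if q ≠ "" then qs ++ [q] else qs) inSec
      else pvLoopA rest qs inSec
    else pvLoopA rest qs inSec

-- A's fallback loop over "Q:" lines
def pvLoopQ : List String → List String → List String
  | [], qs => qs
  | line :: rest, qs =>
    let ls := PySem.Str.strip line
    if PySem.Str.startswith ls "Q:" then
      let q := PySem.Str.strip (PySem.Str.replace ls "Q:" "")
      pvLoopQ rest (if q ≠ "" then qs ++ [q] else qs)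
    else pvLoopQ rest qs

def extract_questions_from_text (text : String) : List String :=
  if text = "" then []
  else
    let qs := pvLoopA (PySem.Str.splitlines text) [] false
    if qs ≠ [] then qs else pvLoopQ (PySem.Str.splitlines text) qs

-- ===== PORT B =====

def pvIsHeading (ln : String) : Bool :=
  PySem.Str.startswith (PySem.Str.lower ln) "## questions needed"

-- Source B's _sections: group lines into (heading, body) pairs; any "## " line opens a section
def pvSections : List String → Option String → List String → List (Option String × List String)
  | [], h, body => [(h, body)]
  | ln :: rest, h, body =>
    if PySem.Str.startswith ln "## " then (h, body) :: pvSections rest (some ln) []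
    else pvSections rest h (body ++ [ln])

-- the dash-line comprehension over a section body
def pvHarvest (body : List String) : List String :=
  ((body.filter (fun ln => PySem.Str.startswith ln "-")).map
      (fun ln => PySem.Str.strip (pvLstripDash ln))).filter (fun q => q != "")

-- Source B's for-loop over the sections: first matching heading wins (return its harvest)
def pvPick : List (Option String × List String) → Option (List String)
  | [] => none
  | (h, body) :: rest =>
    match h with
    | some hd => if pvIsHeading hd then some (pvHarvest body) else pvPick rest
    | none => pvPick rest

-- the "Q:" fallback comprehension
def pvFallback (lines : List String) : List String :=
  ((lines.filter (fun ln => PySem.Str.startswith ln "Q:")).map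
      (fun ln => PySem.Str.strip (PySem.Str.replace ln "Q:" ""))).filter (fun q => q != "")

def extract_questions_from_text_alt (text : String) : List String :=
  let lines := (PySem.Str.splitlines text).map PySem.Str.strip
  match pvPick (pvSections lines none []) with
  | some qs => if ¬ qs.isEmpty then qs else pvFallback lines
  | none => pvFallback lines

-- ===== PRECONDITION & SPEC =====
-- Pre_ excludes texts with MORE THAN ONE 'Questions Needed' heading line, on which A still
-- returns a value: A's continue-over-a-repeated-heading extends the section across it, an
-- accidental corner, while B's section parser treats every heading as a section boundary.
def Pre_extract_questions_from_text (text : String) : Prop :=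
  ((PySem.Str.splitlines text).countP
    (fun l => PySem.Str.startswith (PySem.Str.lower (PySem.Str.strip l)) "## questions needed")) ≤ 1
instance (text : String) : Decidable (Pre_extract_questions_from_text text) := by
  unfold Pre_extract_questions_from_text; infer_instance

def pvWitness_extract_questions_from_text : String := "## Questions Needed\n- a\n\n## Next"

def Spec_extract_questions_from_text (text : String) (out : List String) : Prop := out = extract_questions_from_text_alt text
instance (text : String) (out : List String) : Decidable (Spec_extract_questions_from_text text out) := by unfold Spec_extract_questions_from_text; infer_instance

-- ===== CLAIM (what is proved, stated in full; the proofs are below) =====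
def Claim_equal_extract_questions_from_text : Prop := ∀ (text : String), Dom_extract_questions_from_text text → Pre_extract_questions_from_text text → Spec_extract_questions_from_text text (extract_questions_from_text text)

-- ===== LEMMAS AND PROOFS =====
-- bridges between String-level startswith and its Chars-level simp-normal form
theorem sw_hash (s : String) :
    PySem.Chars.startswith s.toList ['#', '#', ' '] = PySem.Str.startswith s "## " := by
  rw [PySem.Str.startswith_eq, show ("## ".toList : List Char) = ['#', '#', ' '] from by decide]

theorem sw_dash (s : String) :
    PySem.Chars.startswith s.toList ['-'] = PySem.Str.startswith s "-" := by
  rw [PySem.Str.startswith_eq, show ("-".toList : List Char) = ['-'] from by decide]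

-- proof-side helpers describing A's section harvest
def pvIsBoundary (ln : String) : Bool :=
  PySem.Str.startswith ln "## " && !(pvIsHeading ln)

def pvSection (rest : List String) : List String :=
  let sec := match rest.findIdx? pvIsBoundary with
    | none => rest
    | some j => rest.take j
  pvHarvest sec

theorem heading_not_dash (s : String)
    (h : pvIsHeading s = true) :
    PySem.Str.startswith s "-" = false := by
  simp only [pvIsHeading, PySem.Str.startswith_eq, PySem.Str.toList_lower] at *
  rw [PySem.Chars.startswith_iff] at h
  obtain ⟨t, ht⟩ := h
  cases hs : s.toList with
  | nil => simp [hs, PySem.Chars.lower] at ht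
  | cons c cs =>
    simp [hs, PySem.Chars.lower] at ht
    have hc : PySem.Chars.lowerChar c = '#' := ht.1.symm
    have hcne : c ≠ '-' := by
      intro rfl'
      rw [rfl'] at hc
      simp [PySem.Chars.lowerChar, PySem.Chars.isupper] at hc
    rw [Bool.eq_false_iff]
    intro hd
    rw [PySem.Chars.startswith_iff] at hd
    obtain ⟨t', ht'⟩ := hd
    rw [show ("-".toList : List Char) = ['-'] by decide] at ht'
    simp only [List.cons_append, List.nil_append, List.cons.injEq] at ht'
    exact hcne ht'.1.symm

-- lowerChar only moves 'A'..'Z' into 'a'..'z', so a target outside 'a'..'z' is fixed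
theorem lowerChar_fix (c d : Char) (hd : d.toNat < 97 ∨ 122 < d.toNat)
    (hc : PySem.Chars.lowerChar c = d) : c = d := by
  simp only [PySem.Chars.lowerChar, PySem.Chars.isupper] at hc
  split_ifs at hc with hu
  · exfalso
    simp only [Bool.and_eq_true, decide_eq_true_eq, Char.le_def] at hu
    have hv : (c.toNat + 32).isValidChar := by
      left
      have : c.toNat ≤ 90 := hu.2
      omega
    have h2 : (Char.ofNat (c.toNat + 32)).toNat = c.toNat + 32 := by
      simp only [Char.ofNat, hv, dif_pos, Char.ofNatAux]
      rfl
    have h3 := congrArg Char.toNat hc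
    rw [h2] at h3
    have h4 : 97 ≤ d.toNat ∧ d.toNat ≤ 122 := by
      have h5 : 65 ≤ c.toNat := hu.1
      have h6 : c.toNat ≤ 90 := hu.2
      omega
    omega
  · exact hc

-- a heading line starts with "## " (lowerChar fixes '#' and ' ')
theorem heading_hash (s : String) (h : pvIsHeading s = true) :
    PySem.Str.startswith s "## " = true := by
  simp only [pvIsHeading, PySem.Str.startswith_eq, PySem.Str.toList_lower] at *
  rw [PySem.Chars.startswith_iff] at h ⊢
  obtain ⟨t, ht⟩ := h
  cases hs1 : s.toList with
  | nil => rw [hs1] at ht; simp [PySem.Chars.lower] at ht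
  | cons c1 r1 =>
    cases hs2 : r1 with
    | nil => rw [hs1, hs2] at ht; simp [PySem.Chars.lower] at ht
    | cons c2 r2 =>
      cases hs3 : r2 with
      | nil => rw [hs1, hs2, hs3] at ht; simp [PySem.Chars.lower] at ht
      | cons c3 r3 =>
        rw [hs1, hs2, hs3] at ht
        simp [PySem.Chars.lower] at ht
        refine ⟨r3, ?_⟩
        rw [show ("## ".toList : List Char) = ['#', '#', ' '] by decide]
        simp [lowerChar_fix c1 '#' (by decide) ht.1.symm,
          lowerChar_fix c2 '#' (by decide) ht.2.1.symm,
          lowerChar_fix c3 ' ' (by decide) ht.2.2.1.symm]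

theorem pvSection_cons_boundary (ls : String) (L : List String)
    (h : pvIsBoundary ls = true) : pvSection (ls :: L) = [] := by
  have hd : PySem.Str.startswith ls "-" = false := by
    simp only [pvIsBoundary, Bool.and_eq_true] at h
    rw [Bool.eq_false_iff]
    intro hdash
    rw [PySem.Str.startswith_eq, PySem.Chars.startswith_iff] at h hdash
    obtain ⟨t, ht⟩ := h.1
    obtain ⟨t', ht'⟩ := hdash
    rw [show ("## ".toList : List Char) = ['#','#',' '] by decide] at ht
    rw [show ("-".toList : List Char) = ['-'] by decide] at ht'
    rw [← ht] at ht'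
    simp at ht'
  simp [pvSection, List.findIdx?_cons, h, pvHarvest]

theorem pvSection_cons (ls : String) (L : List String)
    (h : pvIsBoundary ls = false) :
    pvSection (ls :: L) =
      (if PySem.Str.startswith ls "-" then
        (if PySem.Str.strip (pvLstripDash ls) ≠ "" then [PySem.Str.strip (pvLstripDash ls)] else [])
       else []) ++ pvSection L := by
  simp only [pvSection, List.findIdx?_cons, h, pvHarvest]
  cases hf : L.findIdx? pvIsBoundary with
  | none =>
    simp only [Option.map_none, List.filter_cons, List.map]
    by_cases hd : PySem.Chars.startswith ls.toList ['-'] = true <;>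
      by_cases hq : PySem.Str.strip (pvLstripDash ls) = "" <;>
      simp [hd, hq, List.filter_cons]
  | some j =>
    simp only [Option.map_some, List.take_succ_cons, List.filter_cons, List.map]
    by_cases hd : PySem.Chars.startswith ls.toList ['-'] = true <;>
      by_cases hq : PySem.Str.strip (pvLstripDash ls) = "" <;>
      simp [hd, hq, List.filter_cons]

theorem pvLoopA_acc (raw : List String) : ∀ (qs : List String) (b : Bool),
    pvLoopA raw qs b = qs ++ pvLoopA raw [] b := by
  induction raw with
  | nil => intro qs b; simp [pvLoopA]
  | cons l rest ih =>
    intro qs b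
    simp only [pvLoopA]
    split_ifs with h1 h2 h3 h4 h5 <;>
      simp [ih (qs ++ [PySem.Str.strip (pvLstripDash (PySem.Str.strip l))]),
            ih [PySem.Str.strip (pvLstripDash (PySem.Str.strip l))], ih qs]

theorem pvLoopA_sec (raw : List String) :
    pvLoopA raw [] true = pvSection (raw.map PySem.Str.strip) := by
  induction raw with
  | nil => simp [pvLoopA, pvSection, pvHarvest]
  | cons l rest ih =>
    simp only [pvLoopA, List.map]
    set ls := PySem.Str.strip l with hls
    by_cases h1 : PySem.Str.startswith (PySem.Str.lower ls) "## questions needed" = true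
    · have hb : pvIsBoundary ls = false := by
        simp only [pvIsBoundary, pvIsHeading, h1, Bool.not_true, Bool.and_false]
      rw [if_pos h1, ih, pvSection_cons ls _ hb, heading_not_dash ls h1]
      simp
    · rw [if_neg h1, if_pos trivial]
      by_cases h2 : PySem.Str.startswith ls "## " = true
      · have h1' : pvIsHeading ls = false := by
          simp only [pvIsHeading]; exact Bool.eq_false_iff.mpr h1
        have hb : pvIsBoundary ls = true := by
          simp only [pvIsBoundary, h2, h1', Bool.not_false, Bool.and_self]
        rw [if_pos h2, pvSection_cons_boundary ls _ hb]
      · have h2' : PySem.Str.startswith ls "## " = false := Bool.eq_false_iff.mpr h2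
        have hb : pvIsBoundary ls = false := by
          simp only [pvIsBoundary, h2', Bool.false_and]
        rw [if_neg h2, pvSection_cons ls _ hb]
        by_cases h3 : PySem.Str.startswith ls "-" = true
        · rw [if_pos h3, if_pos h3]
          by_cases h4 : PySem.Str.strip (pvLstripDash ls) = ""
          · rw [if_neg (by simpa using h4), if_neg (by simpa using h4), ih]
            simp
          · rw [if_pos h4, if_pos h4, pvLoopA_acc, ih]; simp
        · rw [if_neg h3, if_neg h3, ih]; simp

theorem pvLoopA_pre (raw : List String) :
    pvLoopA raw [] false =
      (match (raw.map PySem.Str.strip).findIdx? pvIsHeading with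
        | none => []
        | some i => pvSection ((raw.map PySem.Str.strip).drop (i + 1))) := by
  induction raw with
  | nil => simp [pvLoopA]
  | cons l rest ih =>
    simp only [pvLoopA, List.map, List.findIdx?_cons]
    by_cases h1 : pvIsHeading (PySem.Str.strip l) = true
    · rw [if_pos (by simpa [pvIsHeading] using h1), h1]
      simp only [if_true]
      rw [pvLoopA_sec]
      simp
    · rw [if_neg (by simpa [pvIsHeading] using h1), if_neg h1, if_neg (by simp), ih]
      cases hf : (rest.map PySem.Str.strip).findIdx? pvIsHeading with
      | none => simp
      | some i => simp

theorem pvLoopQ_acc (raw : List String) : ∀ (qs : List String),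
    pvLoopQ raw qs = qs ++ pvLoopQ raw [] := by
  induction raw with
  | nil => intro qs; simp [pvLoopQ]
  | cons l rest ih =>
    intro qs
    simp only [pvLoopQ]
    split_ifs with h1 h2 <;>
      simp [ih (qs ++ [PySem.Str.strip (PySem.Str.replace (PySem.Str.strip l) "Q:" "")]),
            ih [PySem.Str.strip (PySem.Str.replace (PySem.Str.strip l) "Q:" "")], ih qs]

theorem pvLoopQ_fb (raw : List String) :
    pvLoopQ raw [] = pvFallback (raw.map PySem.Str.strip) := by
  induction raw with
  | nil => simp [pvLoopQ, pvFallback]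
  | cons l rest ih =>
    simp only [pvLoopQ, List.map, pvFallback, List.filter_cons]
    by_cases h1 : PySem.Str.startswith (PySem.Str.strip l) "Q:" = true
    · rw [if_pos h1]
      simp only [h1, if_true, List.map, List.filter_cons]
      by_cases h2 : PySem.Str.strip (PySem.Str.replace (PySem.Str.strip l) "Q:" "") = ""
      · simp only [h2]
        rw [if_neg (by simp)]
        rw [ih]
        simp [pvFallback]
      · rw [if_pos h2, pvLoopQ_acc, ih]
        simp [pvFallback, h2]
    · rw [if_neg h1]
      simp only [h1]
      rw [ih]
      simp [pvFallback]

-- B-side: a matching open section collects its body up to the next "## " line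
theorem pvPick_open (rest : List String) : ∀ (hd : String) (body : List String),
    pvIsHeading hd = true →
    pvPick (pvSections rest (some hd) body) =
      some (pvHarvest (body ++ rest.takeWhile (fun l => !PySem.Str.startswith l "## "))) := by
  induction rest with
  | nil => intro hd body hm; simp [pvSections, pvPick, hm]
  | cons r rest ih =>
    intro hd body hm
    simp only [pvSections, List.takeWhile_cons]
    by_cases hr : PySem.Str.startswith r "## " = true
    · have hrc : PySem.Chars.startswith r.toList ['#', '#', ' '] = true := by
        rw [sw_hash]; exact hr
      simp [hrc, pvPick, hm]
    · have hrc : PySem.Chars.startswith r.toList ['#', '#', ' '] = false := by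
        rw [sw_hash]; exact Bool.eq_false_iff.mpr hr
      rw [if_neg (by simp [hrc]), ih hd _ hm]
      simp [hrc]

-- B-side: below a non-matching open section, pvPick is the findIdx?-based spec
theorem pvPick_spec (lines : List String) : ∀ (h : Option String) (body : List String),
    (∀ hd, h = some hd → pvIsHeading hd = false) →
    pvPick (pvSections lines h body) =
      (match lines.findIdx? pvIsHeading with
        | none => none
        | some i => some (pvHarvest ((lines.drop (i + 1)).takeWhile
            (fun l => !PySem.Str.startswith l "## ")))) := by
  induction lines with
  | nil =>
    intro h body hnm
    cases h with
    | none => simp [pvSections, pvPick]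
    | some hd => simp [pvSections, pvPick, hnm hd rfl]
  | cons l rest ih =>
    intro h body hnm
    simp only [pvSections, List.findIdx?_cons]
    by_cases hl : PySem.Str.startswith l "## " = true
    · rw [if_pos hl]
      have hpick : pvPick ((h, body) :: pvSections rest (some l) []) =
          pvPick (pvSections rest (some l) []) := by
        cases h with
        | none => simp [pvPick]
        | some hd => simp [pvPick, hnm hd rfl]
      rw [hpick]
      by_cases hml : pvIsHeading l = true
      · rw [hml, if_pos rfl, pvPick_open rest l [] hml]
        simp
      · have hml' : pvIsHeading l = false := Bool.eq_false_iff.mpr hml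
        rw [hml', if_neg (by simp), ih (some l) [] (by intro hd he; cases he; exact hml')]
        cases hf : rest.findIdx? pvIsHeading with
        | none => simp
        | some i => simp
    · rw [if_neg hl]
      have hml' : pvIsHeading l = false := by
        rw [Bool.eq_false_iff]; intro hm; exact hl (heading_hash l hm)
      rw [hml', if_neg (by simp), ih h (body ++ [l]) hnm]
      cases hf : rest.findIdx? pvIsHeading with
      | none => simp
      | some i => simp

-- with no heading lines in L, A's boundary test degenerates to "## " and the section
-- harvest equals B's takeWhile harvest
theorem pvSection_no_heading (L : List String) (h : L.countP pvIsHeading = 0) :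
    pvSection L = pvHarvest (L.takeWhile (fun l => !PySem.Str.startswith l "## ")) := by
  induction L with
  | nil => simp [pvSection, pvHarvest]
  | cons l rest ih =>
    rw [List.countP_cons] at h
    have hml : pvIsHeading l = false := by
      cases hpv : pvIsHeading l
      · rfl
      · rw [hpv] at h; simp at h
    have hrest : rest.countP pvIsHeading = 0 := by
      rw [hml] at h; simpa using h
    rw [List.takeWhile_cons]
    by_cases hl : PySem.Str.startswith l "## " = true
    · have hlc : PySem.Chars.startswith l.toList ['#', '#', ' '] = true := by
        rw [sw_hash]; exact hl
      have hb : pvIsBoundary l = true := by simp [pvIsBoundary, hlc, hml]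
      rw [pvSection_cons_boundary l rest hb]
      simp [hlc, pvHarvest]
    · have hlc : PySem.Chars.startswith l.toList ['#', '#', ' '] = false := by
        rw [sw_hash]; exact Bool.eq_false_iff.mpr hl
      have hb : pvIsBoundary l = false := by
        simp [pvIsBoundary, hlc]
      rw [pvSection_cons l rest hb, ih hrest]
      by_cases hd : PySem.Str.startswith l "-" = true
      · have hdc : PySem.Chars.startswith l.toList ['-'] = true := by
          rw [sw_dash]; exact hd
        by_cases hq : PySem.Str.strip (pvLstripDash l) = ""
        · simp [pvHarvest, hlc, hdc, hq, hd]
        · simp [pvHarvest, hlc, hdc, hq, hd]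
      · have hdc : PySem.Chars.startswith l.toList ['-'] = false := by
          rw [sw_dash]; exact Bool.eq_false_iff.mpr hd
        simp [pvHarvest, hlc, hdc, hd]

-- the first heading plus the ≤1 bound leaves no heading after it
theorem no_heading_after (lines : List String) :
    ∀ i, lines.findIdx? pvIsHeading = some i → lines.countP pvIsHeading ≤ 1 →
    (lines.drop (i + 1)).countP pvIsHeading = 0 := by
  induction lines with
  | nil => intro i hf; simp [List.findIdx?_nil] at hf
  | cons l rest ih =>
    intro i hf hc
    rw [List.findIdx?_cons] at hf
    rw [List.countP_cons] at hc
    by_cases hl : pvIsHeading l = true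
    · rw [if_pos hl] at hf
      cases hf
      simp only [List.drop_succ_cons, List.drop_zero]
      rw [hl] at hc
      simp only [if_pos] at hc
      omega
    · rw [if_neg hl] at hf
      cases hfr : rest.findIdx? pvIsHeading with
      | none => rw [hfr] at hf; simp at hf
      | some j =>
        rw [hfr] at hf
        simp at hf
        subst hf
        simp only [List.drop_succ_cons]
        exact ih j hfr (by simp [Bool.eq_false_iff.mpr hl] at hc; omega)

-- the whole non-empty-text case, stated over the raw line list
theorem main_lines (raw : List String)
    (hc : (raw.map PySem.Str.strip).countP pvIsHeading ≤ 1) :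
    (if pvLoopA raw [] false ≠ [] then pvLoopA raw [] false
     else pvLoopQ raw (pvLoopA raw [] false)) =
    (match pvPick (pvSections (raw.map PySem.Str.strip) none []) with
      | some qs => if ¬ qs.isEmpty then qs else pvFallback (raw.map PySem.Str.strip)
      | none => pvFallback (raw.map PySem.Str.strip)) := by
  rw [pvLoopA_pre, pvPick_spec _ none [] (by intro hd he; cases he)]
  cases hf : (raw.map PySem.Str.strip).findIdx? pvIsHeading with
  | none =>
    simp only [hf]
    rw [if_neg (by simp), pvLoopQ_fb]
  | some i =>
    simp only [hf]
    have hsec : pvSection ((raw.map PySem.Str.strip).drop (i + 1)) =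
        pvHarvest (((raw.map PySem.Str.strip).drop (i + 1)).takeWhile
          (fun l => !PySem.Str.startswith l "## ")) :=
      pvSection_no_heading _ (no_heading_after _ i hf hc)
    rw [← hsec]
    by_cases hq : pvSection ((raw.map PySem.Str.strip).drop (i + 1)) = []
    · rw [hq]
      rw [if_neg (by simp), if_neg (by simp), pvLoopQ_fb]
    · rw [if_pos hq, if_pos (by simpa [List.isEmpty_iff] using hq)]

theorem countP_strip (raw : List String) :
    (raw.map PySem.Str.strip).countP pvIsHeading =
      raw.countP (fun l =>
        PySem.Str.startswith (PySem.Str.lower (PySem.Str.strip l)) "## questions needed") := by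
  induction raw with
  | nil => simp
  | cons l rest ih => simp [List.countP_cons, ih, pvIsHeading]

theorem alt_empty : extract_questions_from_text_alt "" = [] := by decide

-- ===== VERDICT (by name: the statement is the Claim_ definition above) =====
theorem extract_questions_from_text_spec : Claim_equal_extract_questions_from_text := by
  intro text _ hpre
  unfold Spec_extract_questions_from_text
  by_cases ht : text = ""
  · rw [ht, alt_empty]
    show (if ("" : String) = "" then ([] : List String) else _) = []
    rw [if_pos rfl]
  · show (if text = "" then ([] : List String) else _) = _
    rw [if_neg ht]
    have hc : ((PySem.Str.splitlines text).map PySem.Str.strip).countP pvIsHeading ≤ 1 := by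
      unfold Pre_extract_questions_from_text at hpre
      rw [countP_strip]
      exact hpre
    exact main_lines (PySem.Str.splitlines text) hc
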